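-- pv_equiv track=rewrite | github.com/PTRMAL007/Practical4 | wavToLut.py | format_lut_for_c
-- ===== SOURCE A (Python) =====
-- def format_lut_for_c(lut, var_name, values_per_line=12):
--     """
--     Format the LUT as C array code
--     """
--     c_code = f"// Lookup table for {var_name}\n"
--     c_code += f"// {len(lut)} samples, 12-bit resolution (0-4095)\n"
--     c_code += f"uint16_t {var_name}[{len(lut)}] = {{\n    "
--
--     for i, value in enumerate(lut):
--         c_code += f"{value}"
--         if i < len(lut) - 1:
--             c_code += ", "
--             if (i + 1) % values_per_line == 0:
--                 c_code += "\n    "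
--
--     c_code += "\n};\n"
--     return c_code
-- ===== SOURCE B (Python) =====
-- def format_lut_for_c(lut, var_name, values_per_line=12):
--     """
--     Format the LUT as C array code
--     """
--     n = len(lut)
--     header = (f"// Lookup table for {var_name}\n"
--               f"// {n} samples, 12-bit resolution (0-4095)\n"
--               f"uint16_t {var_name}[{n}] = {{\n    ")
--     chunks = [lut[i:i + values_per_line] for i in range(0, n, values_per_line)]
--     body = ", \n    ".join(", ".join(str(v) for v in chunk) for chunk in chunks)
--     return header + body + "\n};\n"
-- ===== Notes on version B (the rewrite author's own statement) =====
-- stated objective: simpler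
-- what changed: Replaces A's per-element fold with modular-index newline insertion by a partition-then-join decomposition: slice lut into chunks of values_per_line, join each chunk with ', ' and the chunks with ', \n '. Pre_ restricts to positive values_per_line (the natural domain): at values_per_line=0 A raises ZeroDivisionError once lut has >=2 values, and for non-positive widths B's range-step chunking raises ValueError or yields an empty body while A's accidental wrap-at-|n| is not worth mirroring. …
import Mathlib
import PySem

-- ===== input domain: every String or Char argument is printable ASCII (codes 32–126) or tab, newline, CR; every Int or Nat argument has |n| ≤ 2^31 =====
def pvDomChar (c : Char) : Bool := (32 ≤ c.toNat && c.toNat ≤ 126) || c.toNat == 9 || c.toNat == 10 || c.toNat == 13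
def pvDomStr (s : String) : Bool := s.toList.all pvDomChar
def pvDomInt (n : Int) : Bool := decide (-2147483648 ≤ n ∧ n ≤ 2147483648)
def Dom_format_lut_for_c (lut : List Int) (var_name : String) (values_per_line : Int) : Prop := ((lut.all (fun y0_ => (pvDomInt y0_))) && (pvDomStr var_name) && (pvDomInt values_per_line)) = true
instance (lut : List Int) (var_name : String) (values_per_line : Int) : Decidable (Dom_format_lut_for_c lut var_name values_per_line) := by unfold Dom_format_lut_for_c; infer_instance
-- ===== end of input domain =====

-- B replaces A's per-element fold (modular-index newline insertion) by a partition-then-join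
-- decomposition: chunks of values_per_line joined with ", " inside and ", \n    " between; simpler.

-- ===== PORT A =====
def format_lut_for_c (lut : List Int) (var_name : String) (values_per_line : Int) : String :=
  let c0 := "// Lookup table for " ++ var_name ++ "\n"
  let c1 := c0 ++ ("// " ++ PySem.Int.toStr (lut.length : Int) ++ " samples, 12-bit resolution (0-4095)\n")
  let c2 := c1 ++ ("uint16_t " ++ var_name ++ "[" ++ PySem.Int.toStr (lut.length : Int) ++ "] = {\n    ")
  let c3 := (PySem.List.enumerate lut).foldl (fun c iv =>
    let c := c ++ PySem.Int.toStr iv.2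
    if iv.1 < (lut.length : Int) - 1 then
      let c := c ++ ", "
      if PySem.Int.mod (iv.1 + 1) values_per_line = 0 then c ++ "\n    " else c
    else c) c2
  c3 ++ "\n};\n"

-- ===== PORT B =====
def format_lut_for_c_alt (lut : List Int) (var_name : String) (values_per_line : Int) : String :=
  let n : Int := lut.length
  let header := ("// Lookup table for " ++ var_name ++ "\n")
    ++ ("// " ++ PySem.Int.toStr n ++ " samples, 12-bit resolution (0-4095)\n")
    ++ ("uint16_t " ++ var_name ++ "[" ++ PySem.Int.toStr n ++ "] = {\n    ")
  let chunks := (PySem.List.pyRange 0 n values_per_line).map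
    (fun i => PySem.List.slice lut (some i) (some (i + values_per_line)))
  let body := PySem.Str.join ", \n    "
    (chunks.map (fun ch => PySem.Str.join ", " (ch.map PySem.Int.toStr)))
  header ++ body ++ "\n};\n"

-- ===== PRECONDITION & SPEC =====
-- Pre_ restricts to the task's natural domain, positive values_per_line: at values_per_line = 0
-- A raises ZeroDivisionError once lut has ≥ 2 values, and for non-positive widths B's range-step
-- chunking raises ValueError or yields an empty body (A's wrap-at-|n| there is accidental).
def Pre_format_lut_for_c (lut : List Int) (var_name : String) (values_per_line : Int) : Prop :=
  0 < values_per_line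
instance (lut : List Int) (var_name : String) (values_per_line : Int) : Decidable (Pre_format_lut_for_c lut var_name values_per_line) := by unfold Pre_format_lut_for_c; infer_instance
def pvWitness_format_lut_for_c : List Int × String × Int := ([1, 2, 3, 4, 5], "sine_lut", 2)

def Spec_format_lut_for_c (lut : List Int) (var_name : String) (values_per_line : Int) (out : String) : Prop := out = format_lut_for_c_alt lut var_name values_per_line
instance (lut : List Int) (var_name : String) (values_per_line : Int) (out : String) : Decidable (Spec_format_lut_for_c lut var_name values_per_line out) := by unfold Spec_format_lut_for_c; infer_instance

-- ===== CLAIM (what is proved, stated in full; the proofs are below) =====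
def Claim_equal_format_lut_for_c : Prop := ∀ (lut : List Int) (var_name : String) (values_per_line : Int), Dom_format_lut_for_c lut var_name values_per_line → Pre_format_lut_for_c lut var_name values_per_line → Spec_format_lut_for_c lut var_name values_per_line (format_lut_for_c lut var_name values_per_line)

-- ===== LEMMAS AND PROOFS =====

-- A's running string, pulled out of the fold: the piece appended for one enumerated element.
def pvBodyA (n k : Int) : List (Int × Int) → String
  | [] => ""
  | (i, v) :: t =>
      (PySem.Int.toStr v ++
        (if i < n - 1 then ", " ++ (if PySem.Int.mod (i + 1) k = 0 then "\n    " else "") else ""))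
      ++ pvBodyA n k t

theorem pvFoldA (n k : Int) (ps : List (Int × Int)) (c : String) :
    ps.foldl (fun c iv =>
      let c := c ++ PySem.Int.toStr iv.2
      if iv.1 < n - 1 then
        let c := c ++ ", "
        if PySem.Int.mod (iv.1 + 1) k = 0 then c ++ "\n    " else c
      else c) c = c ++ pvBodyA n k ps := by
  induction ps generalizing c with
  | nil => simp [pvBodyA]
  | cons p t ih =>
      obtain ⟨i, v⟩ := p
      simp only [List.foldl_cons, pvBodyA, ih]
      split_ifs <;> simp [String.append_assoc]

theorem pvRange_nil (a b s : Int) (hs : 0 < s) (h : b ≤ a) : PySem.List.pyRange a b s = [] := by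
  rw [PySem.List.pyRange_of_pos a b hs, if_neg (by omega)]
  simp

theorem pvRange_cons (a b s : Int) (hs : 0 < s) (h : a < b) :
    PySem.List.pyRange a b s = a :: PySem.List.pyRange (a + s) b s := by
  rw [PySem.List.pyRange_of_pos a b hs, PySem.List.pyRange_of_pos (a+s) b hs]
  have hds : (b - a + s - 1) / s = (b - a - 1) / s + 1 := by
    rw [show b - a + s - 1 = (b - a - 1) + 1 * s by ring, Int.add_mul_ediv_right _ _ (by omega)]
  have hnn : 0 ≤ (b - a - 1) / s := Int.ediv_nonneg (by omega) (by omega)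
  have hcnt : (if a < b then ((b - a + s - 1) / s).toNat else 0) = ((b - a - 1) / s).toNat + 1 := by
    rw [if_pos h, hds]; omega
  rw [hcnt, List.range_succ_eq_map]
  by_cases h2 : a + s < b
  · rw [if_pos h2]
    have : b - (a + s) + s - 1 = b - a - 1 := by ring
    rw [this]
    simp only [List.map_cons, List.map_map]
    congr 1
    · simp
    apply List.map_congr_left
    intro t _
    simp [Nat.succ_eq_add_one]; ring
  · rw [if_neg h2]
    have : (b - a - 1) / s = 0 := Int.ediv_eq_zero_of_lt (by omega) (by omega)
    rw [this]
    simp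

theorem pvRange_shift (a b s : Int) (hs : 0 < s) :
    PySem.List.pyRange a b s = (PySem.List.pyRange 0 (b - a) s).map (a + ·) := by
  rw [PySem.List.pyRange_of_pos a b hs, PySem.List.pyRange_of_pos 0 (b-a) hs]
  have : (if a < b then ((b - a + s - 1) / s).toNat else 0)
       = (if 0 < b - a then ((b - a - 0 + s - 1) / s).toNat else 0) := by
    by_cases h : a < b
    · rw [if_pos h, if_pos (by omega)]; ring_nf
    · rw [if_neg h, if_neg (by omega)]
  rw [this]
  simp only [List.map_map]
  apply List.map_congr_left
  intro t _
  simp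

theorem pvJoin_singleton (sep x : String) : PySem.Str.join sep [x] = x := by
  simp [PySem.Str.join, PySem.Chars.join_singleton]

theorem pvJoin_cons_cons (sep x y : String) (t : List String) :
    PySem.Str.join sep (x :: y :: t) = x ++ sep ++ PySem.Str.join sep (y :: t) := by
  simp [PySem.Str.join, PySem.Chars.join_cons_cons, String.append_assoc]

def pvRow (c : List Int) : String := PySem.Str.join ", " (c.map PySem.Int.toStr)

def pvC (k : Nat) : Nat → List Int → String
  | _, [] => ""
  | _, [v] => PySem.Int.toStr v
  | p, v :: w :: t =>
      PySem.Int.toStr v ++ (if p = 1 then ", \n    " else ", ")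
        ++ pvC k (if p = 1 then k else p - 1) (w :: t)

theorem pvRow_cons (v : Int) (c : List Int) :
    pvRow (v :: c) = PySem.Int.toStr v ++ (if c = [] then "" else ", " ++ pvRow c) := by
  cases c with
  | nil => simp [pvRow, pvJoin_singleton]
  | cons y t => simp [pvRow, pvJoin_cons_cons, String.append_assoc]

theorem pvC_chunk (k : Nat) (hk : 0 < k) (l : List Int) : ∀ (p : Nat), 0 < p →
    pvC k p l = pvRow (l.take p)
      ++ (if l.drop p = [] then "" else ", \n    " ++ pvC k k (l.drop p)) := by
  induction l with
  | nil => intro p hp; simp [pvC, pvRow, PySem.Str.join, PySem.Chars.join_nil]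
  | cons v t ih =>
      intro p hp
      obtain ⟨q, rfl⟩ : ∃ q, p = q + 1 := ⟨p - 1, by omega⟩
      cases t with
      | nil =>
          have h1 : (([v] : List Int).take (q+1)) = [v] := by simp
          simp [pvC, h1, pvRow, pvJoin_singleton]
      | cons w t' =>
          by_cases hq : q = 0
          · subst hq
            simp only [pvC, if_pos rfl, List.take_succ_cons, List.take_zero,
              List.drop_succ_cons, List.drop_zero]
            rw [pvRow_cons]
            simp [String.append_assoc]
          · have hq1 : ¬ (q + 1 = 1) := by omega
            simp only [pvC, if_neg hq1, List.take_succ_cons, List.drop_succ_cons,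
              Nat.add_sub_cancel]
            rw [ih q (by omega), pvRow_cons]
            have : (w :: t').take q ≠ [] := by
              simp [List.take_eq_nil_iff]; omega
            simp only [if_neg this]
            split_ifs <;> simp [String.append_assoc]

theorem pvB_eq_pvC (k : Nat) (hk : 0 < k) (l : List Int) :
    PySem.Str.join ", \n    "
      (((PySem.List.pyRange 0 (l.length : Int) (k : Int)).map
        (fun i => PySem.List.slice l (some i) (some (i + (k : Int))))).map
        (fun ch => PySem.Str.join ", " (ch.map PySem.Int.toStr)))
      = pvC k k l := by
  have hk' : (0 : Int) < (k : Int) := by exact_mod_cast hk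
  have main : ∀ (m : Nat) (l : List Int), l.length ≤ m →
      PySem.Str.join ", \n    "
        (((PySem.List.pyRange 0 (l.length : Int) (k : Int)).map
          (fun i => PySem.List.slice l (some i) (some (i + (k : Int))))).map
          (fun ch => PySem.Str.join ", " (ch.map PySem.Int.toStr)))
        = pvC k k l := by
    intro m
    induction m with
    | zero =>
        intro l hl
        have : l = [] := List.eq_nil_of_length_eq_zero (by omega)
        subst this
        simp [pvRange_nil 0 0 (k : Int) hk' le_rfl, pvC, PySem.Str.join, PySem.Chars.join_nil]
    | succ m ih =>
        intro l hl
        cases hl0 : l with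
        | nil => simp [pvRange_nil 0 0 (k : Int) hk' le_rfl, pvC, PySem.Str.join, PySem.Chars.join_nil]
        | cons v t =>
        subst hl0
        have hlen : (0 : Int) < ((v :: t).length : Int) := by simp
        rw [pvRange_cons 0 _ _ hk' hlen]
        simp only [List.map_cons, zero_add]
        have hslice0 : PySem.List.slice (v :: t) (some 0) (some (k : Int))
            = (v :: t).take k := by
          have h := PySem.List.slice_natCast_add (v :: t) 0 k
          simpa using h
        rw [pvC_chunk k hk (v :: t) k hk]
        by_cases hbig : (v :: t).length ≤ k
        · have hnil : PySem.List.pyRange (k : Int) ((v :: t).length : Int) (k : Int) = [] :=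
            pvRange_nil _ _ _ hk' (by exact_mod_cast hbig)
          have hdrop : (v :: t).drop k = [] := by rw [List.drop_eq_nil_iff]; exact hbig
          rw [hnil, hslice0]
          simp [pvJoin_singleton, pvRow, hdrop]
        · -- k < length; the remaining ranges shift onto drop k l
          have hklt : (k : Int) < ((v :: t).length : Int) := by
            push_cast; omega
          have hshift : PySem.List.pyRange (k : Int) ((v :: t).length : Int) (k : Int)
              = (PySem.List.pyRange 0 (((v :: t).drop k).length : Int) (k : Int)).map ((k : Int) + ·) := by
            rw [pvRange_shift _ _ _ hk']
            congr 2
            push_cast [List.length_drop]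
            omega
          have hmapeq : (PySem.List.pyRange (k : Int) (((v :: t)).length : Int) (k : Int)).map
                (fun i => PySem.List.slice (v :: t) (some i) (some (i + (k : Int))))
              = (PySem.List.pyRange 0 (((v :: t).drop k).length : Int) (k : Int)).map
                (fun i => PySem.List.slice ((v :: t).drop k) (some i) (some (i + (k : Int)))) := by
            rw [hshift, List.map_map]
            apply List.map_congr_left
            intro i hi
            obtain ⟨hi0, _, _⟩ := (PySem.List.mem_pyRange_iff_of_pos hk' i).mp hi
            obtain ⟨j, rfl⟩ : ∃ j : Nat, i = (j : Int) := ⟨i.toNat, by omega⟩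
            simp only [Function.comp]
            have h1 : (k : Int) + (j : Int) = ((k + j : Nat) : Int) := by push_cast; ring_nf
            have h2 : ((k + j : Nat) : Int) + (k : Int) = ((k + j : Nat) : Int) + ((k : Nat) : Int) := by norm_num
            rw [h1, h2, PySem.List.slice_natCast_add ((v:: t)) (k + j) k]
            have h3 : (j : Int) + (k : Int) = ((j : Nat) : Int) + ((k : Nat) : Int) := by norm_num
            rw [h3, PySem.List.slice_natCast_add ((v :: t).drop k) j k]
            simp [List.drop_drop]
          have hrec := ih ((v :: t).drop k)
            (by simp only [List.length_drop, List.length_cons] at *; omega)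
          have hdropne : (v :: t).drop k ≠ [] := fun h => hbig (List.drop_eq_nil_iff.mp h)
          have hrangene : PySem.List.pyRange 0 (((v :: t).drop k).length : Int) (k : Int) ≠ [] := by
            rw [pvRange_cons 0 _ _ hk'
              (by exact_mod_cast List.length_pos_iff.mpr hdropne)]
            simp
          rw [hmapeq, hslice0]
          cases hR : ((PySem.List.pyRange 0 (((v :: t).drop k).length : Int) (k : Int)).map
              (fun i => PySem.List.slice ((v :: t).drop k) (some i) (some (i + (k : Int))))).map
              (fun ch => PySem.Str.join ", " (ch.map PySem.Int.toStr)) with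
          | nil =>
              exfalso
              apply hrangene
              have := congrArg List.length hR
              simp at this
              simp [this]
          | cons x xs =>
              rw [pvJoin_cons_cons]
              rw [← hR, hrec]
              simp only [pvRow, if_neg hdropne]
              simp [String.append_assoc]
  exact main l.length l le_rfl

theorem pvModSucc (k j : Nat) (hk : 0 < k) : (j + 1) % k = 0 ↔ j % k = k - 1 := by
  have h1 : (j + 1) % k = (j % k + 1) % k := by
    conv_lhs => rw [← Nat.mod_add_mod]
  have h2 : j % k < k := Nat.mod_lt _ hk
  rcases Nat.lt_or_ge (j % k + 1) k with h | h
  · rw [h1, Nat.mod_eq_of_lt h]; omega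
  · have : j % k + 1 = k := by omega
    rw [h1, this, Nat.mod_self]; omega

theorem pvBodyA_eq_pvC (k : Nat) (hk : 0 < k) (l : List Int) (j : Nat) :
    pvBodyA ((j : Int) + l.length) (k : Int) (PySem.List.enumerate l (j : Int))
      = pvC k (k - j % k) l := by
  induction l generalizing j with
  | nil => simp [pvBodyA, pvC, PySem.List.enumerate_nil]
  | cons v t ih =>
      rw [PySem.List.enumerate_cons]
      cases t with
      | nil =>
          simp [pvBodyA, PySem.List.enumerate_nil, pvC]
      | cons w t' =>
          have hlt : (j : Int) < (j : Int) + ((v :: w :: t').length : Int) - 1 := by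
            simp; omega
          have hjk : j % k < k := Nat.mod_lt _ hk
          have hmod : (PySem.Int.mod ((j : Int) + 1) (k : Int) = 0) ↔ j % k = k - 1 := by
            rw [PySem.Int.mod_eq_zero_iff_dvd]
            rw [show ((j : Int) + 1) = ((j + 1 : Nat) : Int) by push_cast; ring]
            rw [Int.natCast_dvd_natCast, Nat.dvd_iff_mod_eq_zero]
            exact pvModSucc k j hk
          have ihspec := ih (j + 1)
          rw [show ((j + 1 : Nat) : Int) = (j : Int) + 1 by push_cast; ring] at ihspec
          rw [show ((j : Int) + 1) + ((w :: t').length : Int)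
              = (j : Int) + ((v :: w :: t').length : Int) by simp; ring] at ihspec
          simp only [pvBodyA, pvC, hlt, if_pos, ihspec]
          by_cases hc : j % k = k - 1
          · have h1 : k - j % k = 1 := by omega
            have h2 : (j + 1) % k = 0 := (pvModSucc k j hk).mpr hc
            rw [if_pos (hmod.mpr hc), h1, h2]
            simp only [Nat.sub_zero]
            rw [show (", " ++ "\n    " : String) = ", \n    " by rfl]
            simp [String.append_assoc]
          · have h1 : k - j % k ≠ 1 := by omega
            have h2 : (j + 1) % k = j % k + 1 := by
              have : (j + 1) % k = (j % k + 1) % k := by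
                conv_lhs => rw [← Nat.mod_add_mod]
              rw [this, Nat.mod_eq_of_lt (by omega)]
            rw [if_neg (fun h => hc (hmod.mp h)), if_neg h1, h2]
            have h3 : k - (j % k + 1) = k - j % k - 1 := by omega
            rw [h3]
            simp only [if_neg h1]
            simp [String.append_assoc]

-- ===== VERDICT (by name: the statement is the Claim_ definition above) =====
theorem format_lut_for_c_spec : Claim_equal_format_lut_for_c := by
  intro lut vn vpl hdom hpre
  have hpre' : (0 : Int) < vpl := hpre
  obtain ⟨k, rfl⟩ : ∃ k : Nat, vpl = (k : Int) :=
    ⟨vpl.toNat, (Int.toNat_of_nonneg (le_of_lt hpre')).symm⟩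
  have hk : 0 < k := by exact_mod_cast hpre'
  simp only [Spec_format_lut_for_c, format_lut_for_c, format_lut_for_c_alt]
  rw [pvFoldA ((lut.length : Int)) (k : Int)]
  have hA := pvBodyA_eq_pvC k hk lut 0
  simp only [Nat.cast_zero, zero_add, Nat.zero_mod, Nat.sub_zero] at hA
  rw [hA, pvB_eq_pvC k hk lut]
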